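-- pv_equiv track=rewrite | github.com/azxskaze/aid1907_0814 | aid1907/leetcode_test/最大柱状矩阵/test.py | max_j
-- ===== SOURCE A (Python) =====
-- def max_j(heights):
--     list1=[]
--     for i in range(len(heights)):
--         if heights[i] == 0:
--             list1.append(0)
--             continue
--         min=heights[i]
--
--         for j in range(i, len(heights)):
--             if heights[j] == 0:
--                 j-=1
--                 break
--             if heights[j]<min:
--                 min = heights[j]
--         list1.append((j-i+1)*min)
--
--     if list1 == []:
--         return 0
--     return max(list1)
-- ===== SOURCE B (Python) =====
-- def max_j(heights):
--     # One backward pass: maintain length and min of the zero-free run starting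
--     # at the current position; candidate there is run_len * run_min (0 on a zero).
--     best = None
--     cnt = 0
--     mn = 0
--     for h in reversed(heights):
--         if h == 0:
--             cnt = 0
--             v = 0
--         else:
--             mn = h if cnt == 0 or h < mn else mn
--             cnt += 1
--             v = cnt * mn
--         best = v if best is None or v > best else best
--     return 0 if best is None else best
-- ===== Notes on version B (the rewrite author's own statement) =====
-- stated objective: faster
-- what changed: A recomputes, for every start index, the span to the next zero and its minimum with an inner scan (O(n^2)); B makes a single backward pass maintaining the length and minimum of the zero-free run starting at the current position, so each candidate is produced in O(1).
import Mathlib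
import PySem

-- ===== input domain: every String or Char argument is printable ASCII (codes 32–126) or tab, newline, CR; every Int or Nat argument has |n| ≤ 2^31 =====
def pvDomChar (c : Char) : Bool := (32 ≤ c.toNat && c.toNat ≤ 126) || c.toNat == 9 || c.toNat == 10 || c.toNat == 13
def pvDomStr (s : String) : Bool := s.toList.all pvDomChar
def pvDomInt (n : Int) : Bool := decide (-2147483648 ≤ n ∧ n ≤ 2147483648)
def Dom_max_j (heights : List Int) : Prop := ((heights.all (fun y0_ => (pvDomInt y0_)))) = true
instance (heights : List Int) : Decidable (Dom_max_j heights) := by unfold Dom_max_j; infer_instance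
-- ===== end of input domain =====

-- B replaces A's per-index inner scan (span to the next zero and its minimum) by one
-- backward pass carrying the current zero-free run's length and minimum (O(n) instead of O(n^2)).

-- ===== PORT A =====
-- A's inner 'for j in range(i, len(heights))' loop with its break ('j -= 1; break' on a zero);
-- the indices fed to pyGetD are always in range, so the default 0 is never used.
def innerA (heights : List Int) (js : List Int) (mn : Int) (j : Int) : Int × Int :=
  match js with
  | [] => (j, mn)
  | j' :: rest =>
    let hj := PySem.List.pyGetD heights j' 0
    if hj == 0 then (j' - 1, mn)
    else innerA heights rest (if hj < mn then hj else mn) j'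

def max_j (heights : List Int) : Int :=
  let n : Int := PySem.List.len heights
  let list1 : List Int :=
    (PySem.List.pyRange 0 n 1).foldl (fun list1 i =>
      let hi := PySem.List.pyGetD heights i 0
      if hi == 0 then list1 ++ [0]
      else
        let r := innerA heights (PySem.List.pyRange i n 1) hi i
        list1 ++ [(r.1 - i + 1) * r.2]) []
  if list1 == [] then 0
  else match PySem.List.max? list1 (fun y => y) with
       | none => 0
       | some m => m

-- ===== PORT B =====
-- 'best = v if best is None or v > best else best'
def bUpd (best : Option Int) (v : Int) : Option Int :=
  match best with
  | none => some v
  | some b => if v > b then some v else some b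

-- loop body of B's single backward pass; state = (cnt, mn, best)
def bStep (st : Int × Int × Option Int) (h : Int) : Int × Int × Option Int :=
  if h == 0 then (0, st.2.1, bUpd st.2.2 0)
  else
    let mn := if st.1 == 0 || h < st.2.1 then h else st.2.1
    let cnt := st.1 + 1
    (cnt, mn, bUpd st.2.2 (cnt * mn))

def max_j_alt (heights : List Int) : Int :=
  let st := heights.reverse.foldl bStep (0, 0, none)
  match st.2.2 with
  | none => 0
  | some b => b

-- ===== PRECONDITION & SPEC =====
def Spec_max_j (heights : List Int) (out : Int) : Prop := out = max_j_alt heights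
instance (heights : List Int) (out : Int) : Decidable (Spec_max_j heights out) := by unfold Spec_max_j; infer_instance

-- ===== CLAIM (what is proved, stated in full; the proofs are below) =====
def Claim_equal_max_j : Prop := ∀ (heights : List Int), Dom_max_j heights → Spec_max_j heights (max_j heights)

-- ===== LEMMAS AND PROOFS =====

-- structural model of A's inner loop: base = index of suf's head inside heights, j0 = incoming j
def innerM (suf : List Int) (mn : Int) (j0 : Int) (base : Int) : Int × Int :=
  match suf with
  | [] => (j0, mn)
  | h :: t => if h == 0 then (base - 1, mn) else innerM t (if h < mn then h else mn) base (base + 1)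

-- candidate produced by A for the suffix h :: t of heights
def cand (h : Int) (t : List Int) : Int :=
  if h == 0 then 0
  else
    let tw := (h :: t).takeWhile (fun x => x != 0)
    ((tw.length : Int)) * tw.foldl min h

def cands : List Int → List Int
  | [] => []
  | h :: t => cand h t :: cands t

def bestOf : List Int → Option Int
  | [] => none
  | x :: r => some (r.foldl max x)

theorem if_lt_eq_min (h m : Int) : (if h < m then h else m) = min h m := by
  by_cases hc : h < m <;> simp [hc] <;> omega

theorem if_gt_eq_max (v b : Int) : (if v > b then v else b) = max b v := by
  by_cases hc : v > b <;> simp [hc] <;> omega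

theorem foldl_min_min (r : List Int) : ∀ a b : Int, r.foldl min (min a b) = min a (r.foldl min b) := by
  induction r with
  | nil => intro a b; rfl
  | cons x r ih => intro a b; simp only [List.foldl_cons]; rw [min_assoc, ih]

theorem foldl_max_max (r : List Int) : ∀ a b : Int, r.foldl max (max a b) = max a (r.foldl max b) := by
  induction r with
  | nil => intro a b; rfl
  | cons x r ih => intro a b; simp only [List.foldl_cons]; rw [max_assoc, ih]

theorem bestOf_cons (c : Int) (l : List Int) : bestOf (c :: l) = bUpd (bestOf l) c := by
  cases l with
  | nil => rfl
  | cons x r =>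
    simp only [bestOf, bUpd, List.foldl_cons]
    rw [← apply_ite some, if_gt_eq_max]
    exact congrArg some (by rw [foldl_max_max r c x, max_comm])

-- pyGetD at the junction of an append
theorem getD_append_len (pre : List Int) (h : Int) (t : List Int) :
    PySem.List.pyGetD (pre ++ h :: t) ((pre.length : Int)) 0 = h := by
  rw [PySem.List.pyGetD_natCast]
  simp [List.getD]

-- A's index-based inner loop equals its structural model
theorem innerA_eq_innerM (suf : List Int) : ∀ (pre : List Int) (mn j0 : Int),
    innerA (pre ++ suf) (PySem.List.pyRange (pre.length : Int) (((pre ++ suf).length : Int)) 1) mn j0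
      = innerM suf mn j0 (pre.length : Int) := by
  induction suf with
  | nil =>
    intro pre mn j0
    rw [PySem.List.pyRange_one_eq_nil (by simp)]
    rfl
  | cons h t ih =>
    intro pre mn j0
    have hlt : (pre.length : Int) < ((pre ++ h :: t).length : Int) := by simp
    rw [PySem.List.pyRange_one_cons hlt]
    show innerA _ _ _ _ = _
    unfold innerA
    rw [getD_append_len]
    simp only [innerM]
    by_cases hz : (h == 0) = true
    · simp [hz]
    · rw [if_neg hz, if_neg hz]
      have hpre : pre ++ h :: t = (pre ++ [h]) ++ t := by simp
      have hlen : (pre.length : Int) + 1 = (((pre ++ [h]).length : Int)) := by simp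
      rw [hpre, hlen, ih (pre ++ [h])]

-- the structural model computed via takeWhile
theorem innerM_run (suf : List Int) : ∀ (mn j0 base : Int), suf ≠ [] →
    innerM suf mn j0 base =
      (base + ((suf.takeWhile (fun x => x != 0)).length : Int) - 1,
       (suf.takeWhile (fun x => x != 0)).foldl min mn) := by
  induction suf with
  | nil => intro _ _ _ hne; exact absurd rfl hne
  | cons h t ih =>
    intro mn j0 base _
    by_cases hz : h = 0
    · subst hz; simp [innerM, List.takeWhile]
    · have hb : (h != 0) = true := by simp [hz]
      simp only [innerM, List.takeWhile_cons, hb, if_pos, beq_iff_eq, hz,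
        if_false, List.length_cons, List.foldl_cons]
      rw [if_lt_eq_min, min_comm h mn]
      cases t with
      | nil =>
        simp only [innerM, List.takeWhile, List.length_nil, List.foldl_nil, Prod.mk.injEq]
        refine ⟨by push_cast; ring, trivial⟩
      | cons x r =>
        rw [ih (min mn h) base (base + 1) (by simp)]
        simp only [Prod.mk.injEq]
        refine ⟨by push_cast; ring, trivial⟩

-- A's outer loop produces exactly the candidate list 'cands'
theorem outer_loop (suf : List Int) : ∀ (pre acc : List Int),
    (PySem.List.pyRange (pre.length : Int) (((pre ++ suf).length : Int)) 1).foldl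
      (fun list1 i =>
        let hi := PySem.List.pyGetD (pre ++ suf) i 0
        if hi == 0 then list1 ++ [0]
        else
          let r := innerA (pre ++ suf) (PySem.List.pyRange i (((pre ++ suf).length : Int)) 1) hi i
          list1 ++ [(r.1 - i + 1) * r.2]) acc
    = acc ++ cands suf := by
  induction suf with
  | nil =>
    intro pre acc
    rw [PySem.List.pyRange_one_eq_nil (by simp)]
    simp [cands]
  | cons h t ih =>
    intro pre acc
    have hlt : (pre.length : Int) < ((pre ++ h :: t).length : Int) := by simp
    rw [PySem.List.pyRange_one_cons hlt]
    simp only [List.foldl_cons, getD_append_len]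
    have hpre : pre ++ h :: t = (pre ++ [h]) ++ t := by simp
    have hlen : (pre.length : Int) + 1 = (((pre ++ [h]).length : Int)) := by simp
    by_cases hz : h == 0
    · have h0 : h = (0:Int) := by simpa using hz
      subst h0
      simp only [hz, if_true]
      rw [hpre, hlen, ih (pre ++ [(0:Int)]) (acc ++ [0])]
      simp [cands, cand]
    · simp only [hz, Bool.false_eq_true, if_false]
      have hinner := innerA_eq_innerM (h :: t) pre h (pre.length : Int)
      rw [hinner, innerM_run (h :: t) h (pre.length : Int) (pre.length : Int) (by simp)]
      have hval : ((pre.length : Int) + (((h :: t).takeWhile (fun x => x != 0)).length : Int) - 1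
            - (pre.length : Int) + 1) * (((h :: t).takeWhile (fun x => x != 0)).foldl min h)
          = cand h t := by
        simp only [cand, hz, Bool.false_eq_true, if_false]
        ring_nf
      rw [hval]
      rw [hpre, hlen, ih (pre ++ [h]) (acc ++ [cand h t])]
      simp [cands]

theorem max_j_eq (heights : List Int) :
    max_j heights = match bestOf (cands heights) with | none => 0 | some b => b := by
  have hlist : (PySem.List.pyRange 0 ((heights.length : Int)) 1).foldl
      (fun list1 i =>
        let hi := PySem.List.pyGetD heights i 0
        if hi == 0 then list1 ++ [0]
        else
          let r := innerA heights (PySem.List.pyRange i ((heights.length : Int)) 1) hi i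
          list1 ++ [(r.1 - i + 1) * r.2]) []
      = cands heights := by
    have := outer_loop heights [] []
    simpa using this
  simp only [max_j, PySem.List.len_eq]
  rw [hlist]
  cases hc : cands heights with
  | nil => simp [bestOf]
  | cons c l =>
    simp only [bestOf]
    rw [PySem.List.max?_id_cons]
    simp

-- B's backward pass: full loop invariant
theorem foldl_cons_min (h x : Int) (r : List Int) :
    (x :: r).foldl min h = min h (r.foldl min x) := by
  simp only [List.foldl_cons]; exact foldl_min_min r h x

theorem bInv (l : List Int) :
    (l.reverse.foldl bStep (0, 0, none)).1 = (((l.takeWhile (fun x => x != 0)).length : Int))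
    ∧ (∀ x r, l.takeWhile (fun x => x != 0) = x :: r →
        (l.reverse.foldl bStep (0, 0, none)).2.1 = r.foldl min x)
    ∧ (l.reverse.foldl bStep (0, 0, none)).2.2 = bestOf (cands l) := by
  induction l with
  | nil => exact ⟨rfl, by intro x r h; simp [List.takeWhile] at h, rfl⟩
  | cons h t ih =>
    have hrev : (h :: t).reverse.foldl bStep ((0 : Int), (0 : Int), (none : Option Int))
        = bStep (t.reverse.foldl bStep (0, 0, none)) h := by
      rw [List.reverse_cons, List.foldl_append]; rfl
    rw [hrev]
    obtain ⟨ih1, ih2, ih3⟩ := ih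
    generalize hS : t.reverse.foldl bStep ((0 : Int), (0 : Int), (none : Option Int)) = S at ih1 ih2 ih3 ⊢
    obtain ⟨cnt, mn, best⟩ := S
    simp only at ih1 ih2 ih3
    by_cases hz : h = 0
    · subst hz
      refine ⟨?_, ?_, ?_⟩
      · simp [bStep, List.takeWhile]
      · intro x r hxr; simp [List.takeWhile] at hxr
      · show bUpd best 0 = bestOf (cands (0 :: t))
        rw [show cands (0 :: t) = cand 0 t :: cands t from rfl, bestOf_cons, ih3]
        simp [cand]
    · have hb : (h != 0) = true := by simp [hz]
      have htw : (h :: t).takeWhile (fun x => x != 0) = h :: t.takeWhile (fun x => x != 0) := by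
        simp [hb]
      have hstep : bStep (cnt, mn, best) h
          = (cnt + 1, (if (cnt == 0 || h < mn) then h else mn),
             bUpd best ((cnt + 1) * (if (cnt == 0 || h < mn) then h else mn))) := by
        simp [bStep, hz]
      rw [hstep]
      cases htt : t.takeWhile (fun x => x != 0) with
      | nil =>
        have hcnt0 : cnt = 0 := by rw [ih1, htt]; rfl
        subst hcnt0
        have hmn : (if ((0:Int) == 0 || h < mn) then h else mn) = h := by simp
        refine ⟨?_, ?_, ?_⟩
        · rw [htw, htt]; simp
        · intro x r hxr
          rw [htw, htt] at hxr
          obtain ⟨hx, hr⟩ := List.cons.injEq .. ▸ hxr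
          subst hx; subst hr
          exact hmn
        · show bUpd best _ = bestOf (cands (h :: t))
          rw [show cands (h :: t) = cand h t :: cands t from rfl, bestOf_cons, ih3, hmn]
          have : cand h t = ((0:Int) + 1) * h := by
            simp [cand, htw, htt, hz]
          rw [this]
      | cons x r =>
        have hcnt : cnt = (((x :: r).length : Int)) := by rw [ih1, htt]
        have hcnt0 : (cnt == 0) = false := by
          rw [hcnt, beq_eq_false_iff_ne]; simp only [List.length_cons]; push_cast; omega
        have hmnold : mn = r.foldl min x := ih2 x r htt
        have hmn : (if (cnt == 0 || h < mn) then h else mn) = min h (r.foldl min x) := by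
          rw [hmnold, hcnt0]
          simp only [Bool.false_or]
          rw [show (decide (h < r.foldl min x) : Bool) = decide (h < r.foldl min x) from rfl]
          by_cases hlt : h < r.foldl min x <;> simp [hlt] <;> omega
        refine ⟨?_, ?_, ?_⟩
        · rw [htw, htt, hcnt]; simp only [List.length_cons]; push_cast; omega
        · intro y s hys
          rw [htw, htt] at hys
          obtain ⟨hy, hs⟩ := List.cons.injEq .. ▸ hys
          subst hy; subst hs
          rw [hmn, foldl_cons_min]
        · show bUpd best _ = bestOf (cands (h :: t))
          rw [show cands (h :: t) = cand h t :: cands t from rfl, bestOf_cons, ih3, hmn, hcnt]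
          have : cand h t = (((x :: r).length : Int) + 1) * min h (r.foldl min x) := by
            simp only [cand, hz, beq_iff_eq, if_false, htw, htt]
            rw [List.foldl_cons, min_self, foldl_cons_min h x r]
            simp only [List.length_cons]
            push_cast; ring
          rw [this]

theorem max_j_alt_eq (heights : List Int) :
    max_j_alt heights = match bestOf (cands heights) with | none => 0 | some b => b := by
  have h := (bInv heights).2.2
  show (match (heights.reverse.foldl bStep (0, 0, none)).2.2 with
        | none => 0 | some b => b) = _
  rw [h]

-- ===== VERDICT (by name: the statement is the Claim_ definition above) =====
theorem max_j_spec : Claim_equal_max_j := by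
  intro heights _
  unfold Spec_max_j
  rw [max_j_eq, max_j_alt_eq]
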